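-- pv_equiv track=rewrite | github.com/wslooney/Symbolic-Logic | predicate_logic.py | wffcheck
-- ===== SOURCE A (Python) =====
-- cap_letters = ["A", "B", "C", "D", "E", "F", "G", "H", "I", "J", "K", "L", "M", "N", "O", "P", "Q", "R", "S", "T", "U", "V", "W", "X", "Y", "Z"]
--
-- dyadic_chars = ['&', 'v', '>', '<']
--
-- obj_names = ["a", "b", "c", "d", "e", "f", "g", "h", "j", "k", "l", "m", "n", "o", "p", "q", "r", "s", "t", "u"]
--
-- obj_variables = ["w", "x", "y", "z"]
--
-- quantifiers = ["3", "4"]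
--
-- def wffcheck (sentence):
-- # wffcheck_pt_1 () takes a sentence as an input and returns 1 iff it meets certain criteria. if it returns 0, then the sentence is not well-formed.
-- # If it returns 1 it might not be well-formed if an object or varaible or star is in the place of a Sentence Letter, so running it a second time after the stars an any objects
-- # or variables except the onese following quantifiers can rule out that case.
-- # basically does the same thing as Polish to infix if it can generate a single sentence w/ no leftovers,
--     def wffcheck_pt_1(wff):
--         stack = []
--         biconditional_fixer = wff.replace("<>", "<").replace('\u2203','3').replace('\u2200','4')
--         # make a list and of Polish wff and read it right to left
--         wffmirror = list(biconditional_fixer)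
--         wffmirror.reverse()
--         while True:
--             try:
--                 for i in wffmirror:
--                     if i in cap_letters:
--                         string = i
--                         while len(stack) > 0 and (stack[-1][0] in obj_names or stack[-1][0] in obj_variables):
--                             string = (string + stack.pop())
--                         stack.append(string)
--                     elif i == '*':
--                         stack.append(i)
--                     elif i in obj_names or i in obj_variables:
--                         string = i
--                         while len(stack) > 0 and (stack[-1] == '*'):
--                             string = (string + stack.pop())
--                         stack.append(string)
--                     elif i == '~':
--                         string = '~' + stack.pop()
--                         stack.append(string)
--                     elif i in dyadic_chars:
--                         string = '(' + stack.pop() + i + stack.pop() + ')'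
--                         stack.append(string)
--                     elif i in quantifiers:
--                         string = '(' + i + stack.pop() + ')' + stack.pop()
--                         stack.append(string)
--                     else:
--                         return 0
--                 if len(stack) == 1:
--                     return 1
--                 else:
--                     return 0
--             except Exception:
--                 return 0
-- #removes stars and any non-first place objects/variables
--     def star_and_relata_remover(wff):
--         biconditional_fixer = wff.replace("<>", "<").replace('\u2203','3').replace('\u2200','4')
--         no_star = biconditional_fixer.replace('*','')
--         no_star_list = list(no_star)
--         relata_remover_stack = []
--         for x in no_star_list:
--             if x not in obj_names and x not in obj_variables:
--                 relata_remover_stack.append(str(x))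
--             else:
--                 if len(relata_remover_stack) > 0 and relata_remover_stack[-1] in quantifiers:
--                     relata_remover_stack.append(x)
--         out = ''.join([str(element) for element in relata_remover_stack])
--         return out
--     if wffcheck_pt_1(sentence) == 1 and wffcheck_pt_1(star_and_relata_remover(sentence)) == 1:
--         return 1
--     else:
--         return 0
-- ===== SOURCE B (Python) =====
-- cap_letters = ["A", "B", "C", "D", "E", "F", "G", "H", "I", "J", "K", "L", "M", "N", "O", "P", "Q", "R", "S", "T", "U", "V", "W", "X", "Y", "Z"]
--
-- dyadic_chars = ['&', 'v', '>', '<']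
--
-- obj_names = ["a", "b", "c", "d", "e", "f", "g", "h", "j", "k", "l", "m", "n", "o", "p", "q", "r", "s", "t", "u"]
--
-- obj_variables = ["w", "x", "y", "z"]
--
-- quantifiers = ["3", "4"]
--
-- _CAPS = frozenset(cap_letters)
-- _OBJ = frozenset(obj_names) | frozenset(obj_variables)
-- _DY = frozenset(dyadic_chars)
-- _QU = frozenset(quantifiers)
--
--
-- def wffcheck(sentence):
--     # Single left-to-right counter scan instead of a reversed stack machine that
--     # builds intermediate strings: scanning the Polish string left to right we keep
--     # the number of terms still needed; a leaf closes one slot, '~' keeps the count,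
--     # a dyadic connective or quantifier opens one more.  A capital letter greedily
--     # swallows the following (object, stars...) groups; a bare object swallows the
--     # following stars.  The string is one well-formed term iff the count is >= 1 at
--     # every character and exactly 0 at the end.
--     def prep(wff):
--         return wff.replace("<>", "<").replace('\u2203', '3').replace('\u2200', '4')
--
--     def scan(cs, need):
--         i, n = 0, len(cs)
--         while i < n:
--             if need == 0:
--                 return False
--             c = cs[i]
--             if c in _CAPS:
--                 i += 1
--                 while i < n and cs[i] in _OBJ:
--                     i += 1
--                     while i < n and cs[i] == '*':
--                         i += 1
--                 need -= 1
--             elif c == '*':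
--                 i += 1
--                 need -= 1
--             elif c in _OBJ:
--                 i += 1
--                 while i < n and cs[i] == '*':
--                     i += 1
--                 need -= 1
--             elif c == '~':
--                 i += 1
--             elif c in _DY or c in _QU:
--                 i += 1
--                 need += 1
--             else:
--                 return False
--         return need == 0
--
--     def ok(wff):
--         return scan(prep(wff), 1)
--
--     def strip_relata(wff):
--         # same job as A's star_and_relata_remover, done with a 'last kept char'
--         # variable instead of peeking at a result stack
--         out = []
--         last = None
--         for x in prep(wff).replace('*', ''):
--             if x not in _OBJ:
--                 out.append(x)
--                 last = x
--             elif last in _QU: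
--                 out.append(x)
--                 last = x
--         return ''.join(out)
--
--     return 1 if ok(sentence) and ok(strip_relata(sentence)) else 0
-- ===== Notes on version B (the rewrite author's own statement) =====
-- stated objective: faster
-- what changed: The reversed-string stack machine that builds every parsed subformula as a string is replaced by a single left-to-right counter scan (number of terms still needed, greedily skipping object/star groups) that builds no strings, and the relata remover's result-stack peek by a last-kept-char variable.
import Mathlib
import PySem

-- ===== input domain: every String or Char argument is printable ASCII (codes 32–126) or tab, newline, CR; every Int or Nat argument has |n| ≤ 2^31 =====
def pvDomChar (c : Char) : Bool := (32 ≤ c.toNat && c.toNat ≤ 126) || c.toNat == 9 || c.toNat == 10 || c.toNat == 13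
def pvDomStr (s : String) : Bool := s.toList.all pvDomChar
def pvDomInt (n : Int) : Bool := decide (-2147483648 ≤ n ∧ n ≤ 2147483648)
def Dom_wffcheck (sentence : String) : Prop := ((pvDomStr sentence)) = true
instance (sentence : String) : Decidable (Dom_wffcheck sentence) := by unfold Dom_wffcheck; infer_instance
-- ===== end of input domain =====

set_option maxRecDepth 4000

-- B replaces A's right-to-left stack machine (which concatenates every parsed subformula into strings)
-- by a single left-to-right counter scan that builds no strings (measured faster); return values agree.

-- ===== PORT A =====
def pvCaps : List Char :=
  ['A','B','C','D','E','F','G','H','I','J','K','L','M','N','O','P','Q','R','S','T','U','V','W','X','Y','Z']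
def pvDy : List Char := ['&','v','>','<']
def pvObjN : List Char := ['a','b','c','d','e','f','g','h','j','k','l','m','n','o','p','q','r','s','t','u']
def pvObjV : List Char := ['w','x','y','z']
def pvQu : List Char := ['3','4']

-- stack[-1][0] in obj_names or stack[-1][0] in obj_variables (stack entries are never
-- empty strings, so Python's t[0] never raises; none ↦ false is exact on reachable states)
def pvObjHead (t : List Char) : Bool :=
  match t.head? with
  | none => false
  | some h => decide (h ∈ pvObjN ∨ h ∈ pvObjV)

-- (len > 0 and last in quantifiers) for an optional last element
def pvQuOpt (o : Option Char) : Bool :=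
  match o with
  | none => false
  | some h => decide (h ∈ pvQu)

-- wff.replace("<>", "<").replace('\u2203','3').replace('\u2200','4')
def pvPrepA (w : String) : String :=
  PySem.Str.replace (PySem.Str.replace (PySem.Str.replace w "<>" "<") "∃" "3") "∀" "4"

-- the inner while of the cap-letter branch: absorb stack tops whose first char is an object
def pvAbsorbCap : List Char → List (List Char) → List Char × List (List Char)
  | s, [] => (s, [])
  | s, t :: rest => if pvObjHead t then pvAbsorbCap (s ++ t) rest else (s, t :: rest)

-- the inner while of the object branch: absorb stack tops equal to "*"
def pvAbsorbStar : List Char → List (List Char) → List Char × List (List Char)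
  | s, [] => (s, [])
  | s, t :: rest => if t = ['*'] then pvAbsorbStar (s ++ t) rest else (s, t :: rest)

-- one iteration of A's for-loop; stack top at the head; none = exception / `return 0` branch
def pvStepA (c : Char) (stk : List (List Char)) : Option (List (List Char)) :=
  if c ∈ pvCaps then
    let p := pvAbsorbCap [c] stk
    some (p.1 :: p.2)
  else if c = '*' then some (['*'] :: stk)
  else if c ∈ pvObjN ∨ c ∈ pvObjV then
    let p := pvAbsorbStar [c] stk
    some (p.1 :: p.2)
  else if c = '~' then
    match stk with
    | [] => none
    | t :: rest => some (('~' :: t) :: rest)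
  else if c ∈ pvDy then
    match stk with
    | a :: b :: rest => some (('(' :: a ++ c :: b ++ [')']) :: rest)
    | _ => none
  else if c ∈ pvQu then
    match stk with
    | a :: b :: rest => some (('(' :: c :: a ++ ')' :: b) :: rest)
    | _ => none
  else none

def pvRunA : List Char → List (List Char) → Option (List (List Char))
  | [], stk => some stk
  | c :: cs, stk =>
    match pvStepA c stk with
    | none => none
    | some s => pvRunA cs s

-- wffcheck_pt_1
def pvPt1A (w : String) : Int :=
  match pvRunA (pvPrepA w).toList.reverse [] with
  | none => 0
  | some stk => if stk.length = 1 then 1 else 0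

-- the for-loop of star_and_relata_remover (stack top at the head)
def pvRemLoopA : List Char → List Char → List Char
  | [], stk => stk
  | x :: xs, stk =>
    if ¬ (x ∈ pvObjN ∨ x ∈ pvObjV) then pvRemLoopA xs (x :: stk)
    else if pvQuOpt stk.head? then pvRemLoopA xs (x :: stk)
    else pvRemLoopA xs stk

def pvRemoverA (w : String) : String :=
  String.ofList (pvRemLoopA (PySem.Str.replace (pvPrepA w) "*" "").toList []).reverse

def wffcheck (sentence : String) : Int :=
  if pvPt1A sentence = 1 ∧ pvPt1A (pvRemoverA sentence) = 1 then 1 else 0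

-- ===== PORT B =====
def pvObj : List Char := pvObjN ++ pvObjV

def pvPrepB (w : String) : String :=
  PySem.Str.replace (PySem.Str.replace (PySem.Str.replace w "<>" "<") "∃" "3") "∀" "4"

-- the inner `while cs[i] == '*'` of B's scan
def pvSkipStars : List Char → List Char
  | [] => []
  | c :: r => if c = '*' then pvSkipStars r else c :: r

lemma pvSkipStars_length : ∀ r : List Char, (pvSkipStars r).length ≤ r.length := by
  intro r
  induction r with
  | nil => simp [pvSkipStars]
  | cons c r ih =>
    simp only [pvSkipStars]
    split
    · exact le_trans ih (Nat.le_succ _)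
    · exact le_refl _

-- the `while cs[i] in _OBJ: … while cs[i] == '*': …` of B's cap branch
def pvSkipGroups : List Char → List Char
  | [] => []
  | c :: r => if c ∈ pvObj then pvSkipGroups (pvSkipStars r) else c :: r
termination_by l => l.length
decreasing_by
  simp only [List.length_cons]
  exact Nat.lt_succ_of_le (pvSkipStars_length r)

lemma pvSkipGroups_length (r : List Char) : (pvSkipGroups r).length ≤ r.length := by
  cases r with
  | nil => simp [pvSkipGroups]
  | cons c r =>
    rw [pvSkipGroups]
    split
    · exact le_trans (le_trans (pvSkipGroups_length (pvSkipStars r)) (pvSkipStars_length r)) (Nat.le_succ _)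
    · exact le_refl _
termination_by r.length
decreasing_by
  simp only [List.length_cons]
  exact Nat.lt_succ_of_le (pvSkipStars_length r)

-- B's left-to-right scan: `need` = number of terms still required
def pvScan : List Char → Nat → Bool
  | [], need => need == 0
  | c :: r, need =>
    match need with
    | 0 => false
    | n + 1 =>
      if c ∈ pvCaps then pvScan (pvSkipGroups r) n
      else if c = '*' then pvScan r n
      else if c ∈ pvObj then pvScan (pvSkipStars r) n
      else if c = '~' then pvScan r (n + 1)
      else if c ∈ pvDy ∨ c ∈ pvQu then pvScan r (n + 2)
      else false
termination_by l _ => l.length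
decreasing_by
  · exact Nat.lt_succ_of_le (pvSkipGroups_length r)
  · exact Nat.lt_succ_of_le (le_refl _)
  · exact Nat.lt_succ_of_le (pvSkipStars_length r)
  · exact Nat.lt_succ_of_le (le_refl _)
  · exact Nat.lt_succ_of_le (le_refl _)

def pvOkB (w : String) : Bool := pvScan (pvPrepB w).toList 1

-- B's strip_relata loop, carrying the last kept char
def pvStripLoopB : Option Char → List Char → List Char
  | _, [] => []
  | last, x :: xs =>
    if ¬ (x ∈ pvObj) then x :: pvStripLoopB (some x) xs
    else if pvQuOpt last then x :: pvStripLoopB (some x) xs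
    else pvStripLoopB last xs

def pvStripB (w : String) : String :=
  String.ofList (pvStripLoopB none (PySem.Str.replace (pvPrepB w) "*" "").toList)

def wffcheck_alt (sentence : String) : Int :=
  if pvOkB sentence && pvOkB (pvStripB sentence) then 1 else 0

-- ===== PRECONDITION & SPEC =====
def Spec_wffcheck (sentence : String) (out : Int) : Prop := out = wffcheck_alt sentence
instance (sentence : String) (out : Int) : Decidable (Spec_wffcheck sentence out) := by unfold Spec_wffcheck; infer_instance

-- ===== CLAIM (what is proved, stated in full; the proofs are below) =====
def Claim_equal_wffcheck : Prop := ∀ (sentence : String), Dom_wffcheck sentence → Spec_wffcheck sentence (wffcheck sentence)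

-- ===== LEMMAS AND PROOFS =====

-- abstract class of a stack entry: exactly "*", starts with an object char, or anything else
inductive PvCls : Type
  | star | objS | other
deriving DecidableEq

def pvCls (t : List Char) : PvCls :=
  if t = ['*'] then .star else if pvObjHead t then .objS else .other

-- A's step on the class abstraction
def pvStepC (c : Char) (stk : List PvCls) : Option (List PvCls) :=
  if c ∈ pvCaps then some (.other :: stk.dropWhile (· == PvCls.objS))
  else if c = '*' then some (.star :: stk)
  else if c ∈ pvObjN ∨ c ∈ pvObjV then some (.objS :: stk.dropWhile (· == PvCls.star))
  else if c = '~' then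
    match stk with
    | [] => none
    | _ :: rest => some (.other :: rest)
  else if c ∈ pvDy then
    match stk with
    | _ :: _ :: rest => some (.other :: rest)
    | _ => none
  else if c ∈ pvQu then
    match stk with
    | _ :: _ :: rest => some (.other :: rest)
    | _ => none
  else none

-- class machine peeling the LEFTMOST char last = A's right-to-left processing
def pvRunC : List Char → Option (List PvCls)
  | [] => some []
  | c :: cs => (pvRunC cs).bind (pvStepC c)

def pvResC (o : Option (List PvCls)) (s : Nat) : Bool :=
  o.elim false (fun stk => stk.length == s)

-- small decidable facts about the literal alphabets
lemma pv_caps_facts : ∀ c ∈ pvCaps, c ≠ '*' ∧ ¬(c ∈ pvObjN ∨ c ∈ pvObjV) := by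
  intro c hc
  fin_cases hc <;> simp [pvObjN, pvObjV]
lemma pv_obj_star : ∀ c ∈ pvObjN ++ pvObjV, c ≠ '*' := by
  intro c hc
  fin_cases hc <;> simp
lemma pv_obj_not_cap : ∀ c ∈ pvObjN ++ pvObjV, c ∉ pvCaps := by
  intro c hc
  fin_cases hc <;> simp [pvCaps]
lemma pv_star_not_obj : ¬(('*' : Char) ∈ pvObjN ∨ '*' ∈ pvObjV) := by
  simp [pvObjN, pvObjV]
lemma pv_star_not_cap : ('*' : Char) ∉ pvCaps := by simp [pvCaps]

lemma pvObjHead_cons (c : Char) (t : List Char) :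
    pvObjHead (c :: t) = decide (c ∈ pvObjN ∨ c ∈ pvObjV) := rfl

lemma pvCls_cap (c : Char) (t : List Char) (h : c ∈ pvCaps) : pvCls (c :: t) = .other := by
  have := pv_caps_facts c h
  simp [pvCls, pvObjHead_cons, this.2, List.cons_eq_cons, this.1]

lemma pvCls_obj (c : Char) (t : List Char) (h : c ∈ pvObjN ∨ c ∈ pvObjV) : pvCls (c :: t) = .objS := by
  have hs : c ≠ '*' := pv_obj_star c (by simp [List.mem_append]; tauto)
  simp [pvCls, pvObjHead_cons, h, List.cons_eq_cons, hs]

lemma pvCls_star : pvCls ['*'] = .star := by simp [pvCls]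

lemma pvCls_tilde (t : List Char) : pvCls ('~' :: t) = .other := by
  simp [pvCls, pvObjHead_cons, List.cons_eq_cons]
  decide

lemma pvCls_paren (t : List Char) : pvCls ('(' :: t) = .other := by
  simp [pvCls, pvObjHead_cons, List.cons_eq_cons]
  decide

lemma pvObjHead_star : pvObjHead ['*'] = false := by
  simp [pvObjHead, pv_star_not_obj]

lemma dropWhile_objS (stk : List (List Char)) :
    (stk.map pvCls).dropWhile (· == PvCls.objS) = (stk.dropWhile pvObjHead).map pvCls := by
  induction stk with
  | nil => simp
  | cons t rest ih =>
    cases h : pvObjHead t with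
    | true =>
      have ht : t ≠ ['*'] := by intro he; rw [he, pvObjHead_star] at h; exact Bool.false_ne_true h
      have : pvCls t = .objS := by simp [pvCls, ht, h]
      simp [List.dropWhile_cons, this, h, ih]
    | false =>
      have : pvCls t ≠ .objS := by
        simp only [pvCls]
        split
        · simp
        · simp [h]
      simp [List.dropWhile_cons, this, h]

lemma dropWhile_star (stk : List (List Char)) :
    (stk.map pvCls).dropWhile (· == PvCls.star) = (stk.dropWhile (fun t => decide (t = ['*']))).map pvCls := by
  induction stk with
  | nil => simp
  | cons t rest ih =>
    by_cases h : t = ['*']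
    · subst h
      simp [List.dropWhile_cons, pvCls_star, ih]
    · have : pvCls t ≠ .star := by
        simp only [pvCls]
        split
        · exact absurd (by assumption) h
        · split <;> simp
      simp [List.dropWhile_cons, this, h]

lemma pvAbsorbCap_spec (stk : List (List Char)) : ∀ (c : Char) (s : List Char),
    ∃ junk, pvAbsorbCap (c :: s) stk = (c :: junk, stk.dropWhile pvObjHead) := by
  induction stk with
  | nil => intro c s; exact ⟨s, rfl⟩
  | cons t rest ih =>
    intro c s
    cases h : pvObjHead t with
    | true =>
      obtain ⟨junk, hj⟩ := ih c (s ++ t)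
      refine ⟨junk, ?_⟩
      simp only [pvAbsorbCap, h, if_true, List.dropWhile_cons, List.cons_append]
      simpa using hj
    | false =>
      refine ⟨s, ?_⟩
      simp [pvAbsorbCap, h, List.dropWhile_cons]

lemma pvAbsorbStar_spec (stk : List (List Char)) : ∀ (c : Char) (s : List Char),
    ∃ junk, pvAbsorbStar (c :: s) stk = (c :: junk, stk.dropWhile (fun t => decide (t = ['*']))) := by
  induction stk with
  | nil => intro c s; exact ⟨s, rfl⟩
  | cons t rest ih =>
    intro c s
    by_cases h : t = ['*']
    · obtain ⟨junk, hj⟩ := ih c (s ++ t)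
      refine ⟨junk, ?_⟩
      simp only [pvAbsorbStar, h, if_true, List.dropWhile_cons, List.cons_append, decide_true]
      simpa [h] using hj
    · refine ⟨s, ?_⟩
      simp [pvAbsorbStar, h, List.dropWhile_cons]

lemma pvStep_sim (c : Char) (stk : List (List Char)) :
    Option.map (List.map pvCls) (pvStepA c stk) = pvStepC c (List.map pvCls stk) := by
  by_cases hcap : c ∈ pvCaps
  · obtain ⟨junk, hj⟩ := pvAbsorbCap_spec stk c []
    simp [pvStepA, pvStepC, hcap, hj, pvCls_cap c junk hcap, dropWhile_objS]
  by_cases hst : c = '*'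
  · subst hst
    simp [pvStepA, pvStepC, hcap, pvCls_star]
  by_cases hobj : c ∈ pvObjN ∨ c ∈ pvObjV
  · obtain ⟨junk, hj⟩ := pvAbsorbStar_spec stk c []
    simp [pvStepA, pvStepC, hcap, hst, hobj, hj, pvCls_obj c junk hobj, dropWhile_star]
  by_cases htl : c = '~'
  · subst htl
    cases stk with
    | nil => simp [pvStepA, pvStepC, hcap, hobj]
    | cons t rest => simp [pvStepA, pvStepC, hcap, hobj, pvCls_tilde]
  by_cases hdy : c ∈ pvDy
  · cases stk with
    | nil => simp [pvStepA, pvStepC, hcap, hst, hobj, htl, hdy]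
    | cons a tl =>
      cases tl with
      | nil => simp [pvStepA, pvStepC, hcap, hst, hobj, htl, hdy]
      | cons b rest => simp [pvStepA, pvStepC, hcap, hst, hobj, htl, hdy, pvCls_paren]
  by_cases hqu : c ∈ pvQu
  · cases stk with
    | nil => simp [pvStepA, pvStepC, hcap, hst, hobj, htl, hdy, hqu]
    | cons a tl =>
      cases tl with
      | nil => simp [pvStepA, pvStepC, hcap, hst, hobj, htl, hdy, hqu]
      | cons b rest => simp [pvStepA, pvStepC, hcap, hst, hobj, htl, hdy, hqu, pvCls_paren]
  simp [pvStepA, pvStepC, hcap, hst, hobj, htl, hdy, hqu]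

lemma pvRunA_append (l1 l2 : List Char) : ∀ stk,
    pvRunA (l1 ++ l2) stk = (pvRunA l1 stk).bind (fun s => pvRunA l2 s) := by
  induction l1 with
  | nil => intro stk; simp [pvRunA]
  | cons c cs ih =>
    intro stk
    simp only [List.cons_append, pvRunA]
    cases pvStepA c stk with
    | none => simp
    | some s => simpa using ih s

theorem pvRunA_runC : ∀ cs : List Char, Option.map (List.map pvCls) (pvRunA cs.reverse []) = pvRunC cs := by
  intro cs
  induction cs with
  | nil => simp [pvRunA, pvRunC]
  | cons c cs ih =>
    show Option.map (List.map pvCls) (pvRunA (c :: cs).reverse []) = (pvRunC cs).bind (pvStepC c)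
    rw [List.reverse_cons, pvRunA_append]
    cases hr : pvRunA cs.reverse [] with
    | none =>
      rw [hr] at ih
      simp only [Option.map_none] at ih
      rw [← ih]
      simp
    | some s =>
      rw [hr] at ih
      simp only [Option.map_some] at ih
      rw [← ih]
      simp only [Option.bind_some]
      have hone : pvRunA [c] s = pvStepA c s := by
        show (match pvStepA c s with | none => none | some s' => pvRunA [] s') = _
        cases pvStepA c s <;> rfl
      rw [hone]
      exact pvStep_sim c s

lemma pvStepC_shape (c : Char) (t stk : List PvCls) (h : pvStepC c t = some stk) :
    ∃ x t', stk = x :: t' ∧ (x = PvCls.star → c = '*') ∧ (x = PvCls.objS → (c ∈ pvObjN ∨ c ∈ pvObjV)) := by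
  unfold pvStepC at h
  split_ifs at h with h1 h2 h3 h4 h5 h6
  · exact ⟨_, _, (Option.some.inj h).symm, by simp, by simp⟩
  · exact ⟨_, _, (Option.some.inj h).symm, fun _ => h2, by simp⟩
  · exact ⟨_, _, (Option.some.inj h).symm, by simp, fun _ => h3⟩
  · cases t with
    | nil => simp at h
    | cons a rest => exact ⟨_, _, (Option.some.inj h).symm, by simp, by simp⟩
  · cases t with
    | nil => simp at h
    | cons a rest =>
      cases rest with
      | nil => simp at h
      | cons b rest' => exact ⟨_, _, (Option.some.inj h).symm, by simp, by simp⟩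
  · cases t with
    | nil => simp at h
    | cons a rest =>
      cases rest with
      | nil => simp at h
      | cons b rest' => exact ⟨_, _, (Option.some.inj h).symm, by simp, by simp⟩

lemma pvRunC_skipStars : ∀ r : List Char,
    pvRunC (pvSkipStars r) = Option.map (List.dropWhile (· == PvCls.star)) (pvRunC r) := by
  intro r
  induction r with
  | nil => simp [pvSkipStars, pvRunC]
  | cons c r2 ih =>
    by_cases h : c = '*'
    · subst h
      rw [show pvSkipStars ('*' :: r2) = pvSkipStars r2 from by simp [pvSkipStars], ih]
      show _ = Option.map _ ((pvRunC r2).bind (pvStepC '*'))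
      cases pvRunC r2 with
      | none => simp
      | some stk =>
        simp only [Option.bind_some]
        rw [show pvStepC '*' stk = some (.star :: stk) from by
          simp [pvStepC, pv_star_not_cap]]
        simp [List.dropWhile_cons]
    · rw [show pvSkipStars (c :: r2) = c :: r2 from by simp [pvSkipStars, h]]
      cases ho : pvRunC (c :: r2) with
      | none => simp
      | some stk =>
        simp only [Option.map_some]
        have : ∃ t, pvStepC c t = some stk := by
          rw [show pvRunC (c :: r2) = (pvRunC r2).bind (pvStepC c) from rfl] at ho
          cases hr : pvRunC r2 with
          | none => rw [hr] at ho; simp at ho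
          | some t => rw [hr] at ho; exact ⟨t, ho⟩
        obtain ⟨t, ht⟩ := this
        obtain ⟨x, t', hx, hxs, _⟩ := pvStepC_shape c t stk ht
        subst hx
        have : (x == PvCls.star) = false := by
          cases x <;> simp_all
        simp [List.dropWhile_cons, this]

theorem pvRunC_skipGroups (r : List Char) :
    pvRunC (pvSkipGroups r) = Option.map (List.dropWhile (· == PvCls.objS)) (pvRunC r) := by
  cases r with
  | nil => simp [pvSkipGroups, pvRunC]
  | cons c r2 =>
    rw [pvSkipGroups]
    by_cases h : c ∈ pvObj
    · rw [if_pos h, pvRunC_skipGroups (pvSkipStars r2), pvRunC_skipStars]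
      have hobj : c ∈ pvObjN ∨ c ∈ pvObjV := by
        simpa [pvObj, List.mem_append] using h
      have hcap : c ∉ pvCaps := pv_obj_not_cap c (by simpa [pvObj] using h)
      have hst : c ≠ '*' := pv_obj_star c (by simpa [pvObj] using h)
      show _ = Option.map _ ((pvRunC r2).bind (pvStepC c))
      cases pvRunC r2 with
      | none => simp
      | some stk =>
        simp only [Option.bind_some, Option.map_some]
        rw [show pvStepC c stk = some (.objS :: stk.dropWhile (· == PvCls.star)) from by
          simp [pvStepC, hcap, hst, hobj]]
        simp [List.dropWhile_cons]
    · rw [if_neg h]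
      cases ho : pvRunC (c :: r2) with
      | none => simp
      | some stk =>
        simp only [Option.map_some]
        have : ∃ t, pvStepC c t = some stk := by
          rw [show pvRunC (c :: r2) = (pvRunC r2).bind (pvStepC c) from rfl] at ho
          cases hr : pvRunC r2 with
          | none => rw [hr] at ho; simp at ho
          | some t => rw [hr] at ho; exact ⟨t, ho⟩
        obtain ⟨t, ht⟩ := this
        obtain ⟨x, t', hx, _, hxo⟩ := pvStepC_shape c t stk ht
        subst hx
        have : (x == PvCls.objS) = false := by
          cases x with
          | objS => exact absurd (hxo rfl) (by simpa [pvObj, List.mem_append] using h)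
          | star => simp
          | other => simp
        simp [List.dropWhile_cons, this]
termination_by r.length
decreasing_by
  simp only [List.length_cons]
  exact Nat.lt_succ_of_le (pvSkipStars_length r2)

theorem pvScan_resC (cs : List Char) (need : Nat) : pvScan cs need = pvResC (pvRunC cs) need := by
  cases cs with
  | nil =>
    rw [pvScan.eq_def]
    cases need <;> simp [pvRunC, pvResC]
  | cons c r =>
    rw [pvScan.eq_def]
    cases need with
    | zero =>
      show false = pvResC ((pvRunC r).bind (pvStepC c)) 0
      cases hr : pvRunC r with
      | none => simp [pvResC]
      | some stk =>
        simp only [Option.bind_some]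
        cases hs : pvStepC c stk with
        | none => simp [pvResC]
        | some stk2 =>
          obtain ⟨x, t', hx, _, _⟩ := pvStepC_shape c stk stk2 hs
          subst hx
          simp [pvResC]
    | succ n =>
      show (if c ∈ pvCaps then pvScan (pvSkipGroups r) n
        else if c = '*' then pvScan r n
        else if c ∈ pvObj then pvScan (pvSkipStars r) n
        else if c = '~' then pvScan r (n + 1)
        else if c ∈ pvDy ∨ c ∈ pvQu then pvScan r (n + 2)
        else false) = pvResC ((pvRunC r).bind (pvStepC c)) (n + 1)
      by_cases hcap : c ∈ pvCaps
      · rw [if_pos hcap, pvScan_resC (pvSkipGroups r) n, pvRunC_skipGroups]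
        cases pvRunC r with
        | none => simp [pvResC]
        | some stk =>
          simp only [Option.bind_some, Option.map_some]
          rw [show pvStepC c stk = some (.other :: stk.dropWhile (· == PvCls.objS)) from by
            simp [pvStepC, hcap]]
          simp [pvResC]
      rw [if_neg hcap]
      by_cases hst : c = '*'
      · subst hst
        rw [if_pos rfl, pvScan_resC r n]
        cases pvRunC r with
        | none => simp [pvResC]
        | some stk =>
          simp only [Option.bind_some]
          rw [show pvStepC '*' stk = some (.star :: stk) from by
            simp [pvStepC, pv_star_not_cap]]
          simp [pvResC]
      rw [if_neg hst]
      by_cases hobj : c ∈ pvObj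
      · have hobj' : c ∈ pvObjN ∨ c ∈ pvObjV := by simpa [pvObj, List.mem_append] using hobj
        rw [if_pos hobj, pvScan_resC (pvSkipStars r) n, pvRunC_skipStars]
        cases pvRunC r with
        | none => simp [pvResC]
        | some stk =>
          simp only [Option.bind_some, Option.map_some]
          rw [show pvStepC c stk = some (.objS :: stk.dropWhile (· == PvCls.star)) from by
            simp [pvStepC, hcap, hst, hobj']]
          simp [pvResC]
      rw [if_neg hobj]
      have hobj' : ¬(c ∈ pvObjN ∨ c ∈ pvObjV) := by
        simpa [pvObj, List.mem_append] using hobj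
      by_cases htl : c = '~'
      · subst htl
        rw [if_pos rfl, pvScan_resC r (n + 1)]
        cases pvRunC r with
        | none => simp [pvResC]
        | some stk =>
          simp only [Option.bind_some]
          cases stk with
          | nil =>
            rw [show pvStepC '~' [] = none from by simp [pvStepC, hcap, hobj']]
            simp [pvResC]
          | cons t ts =>
            rw [show pvStepC '~' (t :: ts) = some (.other :: ts) from by
              simp [pvStepC, hcap, hobj']]
            simp [pvResC]
      rw [if_neg htl]
      by_cases hdq : c ∈ pvDy ∨ c ∈ pvQu
      · rw [if_pos hdq, pvScan_resC r (n + 2)]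
        cases pvRunC r with
        | none => simp [pvResC]
        | some stk =>
          simp only [Option.bind_some]
          have hstep : pvStepC c stk = match stk with
              | _ :: _ :: rest => some (.other :: rest)
              | _ => none := by
            rcases hdq with hdy | hqu
            · simp [pvStepC, hcap, hst, hobj', htl, hdy]
            · have hdy : c ∉ pvDy := by
                intro hc
                have := pv_caps_facts
                fin_cases hc <;> revert hqu <;> simp [pvQu]
              simp [pvStepC, hcap, hst, hobj', htl, hdy, hqu]
          cases stk with
          | nil => rw [hstep]; simp [pvResC]
          | cons a ts =>
            cases ts with
            | nil => rw [hstep]; simp [pvResC]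
            | cons b ts' => rw [hstep]; simp [pvResC]
      rw [if_neg hdq]
      push_neg at hdq
      cases pvRunC r with
      | none => simp [pvResC]
      | some stk =>
        simp only [Option.bind_some]
        rw [show pvStepC c stk = none from by
          simp [pvStepC, hcap, hst, hobj', htl, hdq.1, hdq.2]]
        simp [pvResC]
termination_by cs.length
decreasing_by
  · exact Nat.lt_succ_of_le (pvSkipGroups_length r)
  · exact Nat.lt_succ_of_le (le_refl _)
  · exact Nat.lt_succ_of_le (pvSkipStars_length r)
  · exact Nat.lt_succ_of_le (le_refl _)
  · exact Nat.lt_succ_of_le (le_refl _)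

theorem pvPt1_eq (w : String) : pvPt1A w = (if pvOkB w then 1 else 0) := by
  have hpp : pvPrepB w = pvPrepA w := rfl
  have h := pvRunA_runC (pvPrepA w).toList
  have h2 := pvScan_resC (pvPrepA w).toList 1
  unfold pvPt1A pvOkB
  rw [hpp]
  cases hr : pvRunA (pvPrepA w).toList.reverse [] with
  | none =>
    rw [hr] at h
    simp only [Option.map_none] at h
    rw [← h] at h2
    rw [h2]
    simp [pvResC]
  | some stk =>
    rw [hr] at h
    simp only [Option.map_some] at h
    rw [← h] at h2
    rw [h2]
    by_cases hl : stk.length = 1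
    · simp [pvResC, hl]
    · simp [pvResC, hl]

lemma pvRemLoop_strip : ∀ (xs stk : List Char),
    (pvRemLoopA xs stk).reverse = stk.reverse ++ pvStripLoopB stk.head? xs := by
  intro xs
  induction xs with
  | nil => intro stk; simp [pvRemLoopA, pvStripLoopB]
  | cons x xs ih =>
    intro stk
    rw [pvRemLoopA, pvStripLoopB]
    by_cases hx : x ∈ pvObjN ∨ x ∈ pvObjV
    · have hx' : x ∈ pvObj := List.mem_append.mpr hx
      rw [if_neg (not_not_intro hx), if_neg (not_not_intro hx')]
      by_cases hq : pvQuOpt stk.head? = true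
      · rw [if_pos hq, if_pos hq, ih (x :: stk)]
        simp
      · rw [if_neg hq, if_neg hq, ih stk]
    · have hx' : x ∉ pvObj := fun hm => hx (List.mem_append.mp hm)
      rw [if_pos hx, if_pos hx', ih (x :: stk)]
      simp

theorem pvStrip_eq (w : String) : pvRemoverA w = pvStripB w := by
  unfold pvRemoverA pvStripB
  rw [show pvPrepB w = pvPrepA w from rfl, pvRemLoop_strip]
  simp

-- ===== VERDICT (by name: the statement is the Claim_ definition above) =====
theorem wffcheck_spec : Claim_equal_wffcheck := by
  intro sentence _
  unfold Spec_wffcheck wffcheck wffcheck_alt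
  rw [pvPt1_eq, pvPt1_eq, pvStrip_eq]
  cases h1 : pvOkB sentence <;> cases h2 : pvOkB (pvStripB sentence) <;> simp
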